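-- pv_equiv track=rewrite | github.com/jaredfung9/fung-jared-advent-of-code-repository | AOC2024/day_05/day5.py | fix_manual
-- ===== SOURCE A (Python) =====
-- def get_relevant_rules(prereq_list, pages):
--     relevant = []
--     for page in pages:
--         if page in prereq_list:
--             relevant.append(page)
--     return relevant
--
-- def fix_manual(update, dict):
--     page_rule_pairs = []
--     for page in update:
--         pair = (page, 0)
--         if page in dict:
--             pair = (page, len(get_relevant_rules(dict[page], update)))
--         page_rule_pairs.append(pair)
--
--     page_rule_pairs.sort(key=lambda pair : pair[1])
--     return [pair[0] for pair in page_rule_pairs]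
-- ===== SOURCE B (Python) =====
-- def fix_manual(update, dict):
--     # counting/bucket sort by number of prerequisite pages present in the update
--     keys = []
--     for page in update:
--         if page in dict:
--             prereqs = dict[page]
--             keys.append(sum(1 for p in update if p in prereqs))
--         else:
--             keys.append(0)
--     m = 0
--     for k in keys:
--         m = max(m, k)
--     buckets = [[] for _ in range(m + 1)]
--     for page, k in zip(update, keys):
--         buckets[k].append(page)
--     return [page for bucket in buckets for page in bucket]
-- ===== Notes on version B (the rewrite author's own statement) =====
-- stated objective: alternative
-- what changed: B replaces A's stable comparison sort of (page, count) pairs by a counting/bucket sort: it computes each page's prerequisite count, allocates max+1 buckets, appends pages to their count's bucket in update order, and concatenates the buckets.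
import Mathlib
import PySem

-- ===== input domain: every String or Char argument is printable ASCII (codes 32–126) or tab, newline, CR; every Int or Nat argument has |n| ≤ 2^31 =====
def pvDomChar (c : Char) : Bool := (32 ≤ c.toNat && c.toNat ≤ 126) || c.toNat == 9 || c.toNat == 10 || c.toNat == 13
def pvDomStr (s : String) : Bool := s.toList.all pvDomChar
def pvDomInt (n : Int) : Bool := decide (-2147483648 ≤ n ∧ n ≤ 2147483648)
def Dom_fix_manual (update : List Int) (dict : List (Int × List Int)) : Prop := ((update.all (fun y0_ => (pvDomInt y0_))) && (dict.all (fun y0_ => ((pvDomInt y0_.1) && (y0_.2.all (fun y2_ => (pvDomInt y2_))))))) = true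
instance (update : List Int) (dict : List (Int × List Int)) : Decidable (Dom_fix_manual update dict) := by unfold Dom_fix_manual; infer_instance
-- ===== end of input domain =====

-- B replaces A's stable comparison sort of (page, count) pairs by a counting/bucket sort over the counts; same return value, no speed claim.

-- ===== PORT A =====
-- get_relevant_rules: collect the pages of `pages` that occur in prereq_list, in order
def get_relevant_rules (prereq_list : List Int) (pages : List Int) : List Int :=
  pages.foldl (fun relevant page => if page ∈ prereq_list then relevant ++ [page] else relevant) []

def fix_manual (update : List Int) (dict : List (Int × List Int)) : List Int :=
  let page_rule_pairs : List (Int × Nat) :=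
    update.foldl (fun acc page =>
      let pair : Int × Nat :=
        match dict.lookup page with          -- `page in dict` / `dict[page]` (first-match lookup)
        | some pre => (page, (get_relevant_rules pre update).length)
        | none => (page, 0)
      acc ++ [pair]) []
  (PySem.List.sorted page_rule_pairs (fun pair => pair.2) false).map (fun pair => pair.1)

-- ===== PORT B =====
def fix_manual_alt (update : List Int) (dict : List (Int × List Int)) : List Int :=
  let keys : List Nat :=
    update.foldl (fun ks page =>
      match dict.lookup page with
      | some prereqs => ks ++ [update.countP (fun p => p ∈ prereqs)]   -- sum(1 for p in update if p in prereqs)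
      | none => ks ++ [0]) []
  let m : Nat := keys.foldl max 0
  let buckets0 : List (List Int) := List.replicate (m + 1) []
  let buckets := (update.zip keys).foldl
    (fun bs pk => bs.set pk.2 (bs.getD pk.2 [] ++ [pk.1])) buckets0
  buckets.flatten

-- ===== PRECONDITION & SPEC =====
def Spec_fix_manual (update : List Int) (dict : List (Int × List Int)) (out : List Int) : Prop := out = fix_manual_alt update dict
instance (update : List Int) (dict : List (Int × List Int)) (out : List Int) : Decidable (Spec_fix_manual update dict out) := by unfold Spec_fix_manual; infer_instance

-- ===== CLAIM (what is proved, stated in full; the proofs are below) =====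
def Claim_equal_fix_manual : Prop := ∀ (update : List Int) (dict : List (Int × List Int)), Dom_fix_manual update dict → Spec_fix_manual update dict (fix_manual update dict)

-- ===== LEMMAS AND PROOFS =====

-- the key of a page: number of update pages among its prerequisites (0 if absent from dict)
def keyOf (update : List Int) (dict : List (Int × List Int)) (page : Int) : Nat :=
  match dict.lookup page with
  | some pre => (update.filter (fun p => p ∈ pre)).length
  | none => 0

-- generic fold-append lemma
theorem foldl_append_map {α β : Type} (f : α → β) (l : List α) (acc : List β) :
    l.foldl (fun a x => a ++ [f x]) acc = acc ++ l.map f := by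
  induction l generalizing acc with
  | nil => simp
  | cons x t ih => simp [ih]

theorem grr_eq_filter (pre pages : List Int) :
    get_relevant_rules pre pages = pages.filter (fun p => p ∈ pre) := by
  unfold get_relevant_rules
  simpa using PySem.List.foldl_append_if (fun p => decide (p ∈ pre)) id pages []

-- max-fold bounds
theorem le_foldl_max_init (l : List Nat) (a : Nat) : a ≤ l.foldl max a := by
  induction l generalizing a with
  | nil => simp
  | cons x t ih => exact le_trans (Nat.le_max_left a x) (ih _)

theorem mem_le_foldl_max (l : List Nat) (a x : Nat) (hx : x ∈ l) : x ≤ l.foldl max a := by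
  induction l generalizing a with
  | nil => cases hx
  | cons y t ih =>
    rcases List.mem_cons.1 hx with h | h
    · subst h; exact le_trans (Nat.le_max_right a x) (le_foldl_max_init t _)
    · exact ih _ h

-- insertBy facts
theorem insertBy_all_before {α : Type} (before : α → α → Bool) (x : α) (q : List α)
    (h : ∀ y ∈ q, before x y = true) : PySem.List.insertBy before x q = x :: q := by
  cases q with
  | nil => simp [PySem.List.insertBy]
  | cons y t => simp [PySem.List.insertBy, h y (List.mem_cons_self)]

theorem insertBy_append_skip {α : Type} (before : α → α → Bool) (x : α) (l1 l2 : List α)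
    (h : ∀ y ∈ l1, before x y = false) :
    PySem.List.insertBy before x (l1 ++ l2) = l1 ++ PySem.List.insertBy before x l2 := by
  induction l1 with
  | nil => simp
  | cons y t ih =>
    have hy : before x y = false := h y (List.mem_cons_self)
    simp [PySem.List.insertBy, hy]
    exact ih (fun z hz => h z (List.mem_cons_of_mem _ hz))

-- the bucket decomposition of a stable sort by a Nat-valued key
theorem sorted_eq_buckets {α : Type} (key : α → Nat) (xs : List α) (m : Nat)
    (hb : ∀ x ∈ xs, key x ≤ m) :
    PySem.List.sorted xs key false
      = (List.range (m+1)).flatMap (fun k => xs.filter (fun x => key x == k)) := by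
  induction xs using List.reverseRecOn with
  | nil => simp [PySem.List.sorted]
  | append_singleton ys x ih =>
    have hys : ∀ y ∈ ys, key y ≤ m := fun y hy => hb y (by simp [hy])
    have hx : key x ≤ m := hb x (by simp)
    have hsorted : PySem.List.sorted (ys ++ [x]) key false
        = PySem.List.insertBy (fun a b => decide (key a < key b)) x (PySem.List.sorted ys key false) := by
      rw [PySem.List.sorted_eq_foldl_insertBy, PySem.List.sorted_eq_foldl_insertBy, List.foldl_append]
      simp
    set c := key x with hc
    -- range splits
    have hr1 : List.range (m+1) = List.range' 0 (c+1) ++ List.range' (c+1) (m-c) := by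
      have h := List.range'_append (s := 0) (m := c+1) (n := m-c) (step := 1)
      simp only [Nat.zero_add, Nat.one_mul] at h
      rw [List.range_eq_range', show m+1 = (c+1)+(m-c) from by omega]
      exact h.symm
    have hr2 : List.range' 0 (c+1) = List.range' 0 c ++ [c] := by
      have := List.range'_append (s := 0) (m := c) (n := 1) (step := 1)
      simpa using this.symm
    rw [hsorted, ih hys]
    rw [hr1]
    rw [List.flatMap_append, List.flatMap_append]
    -- LHS: insert x past the low buckets
    rw [insertBy_append_skip _ _ _ _ (by
      intro y hy
      simp only [List.mem_flatMap, List.mem_range'_1, List.mem_filter] at hy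
      obtain ⟨k, hk, _, hkey⟩ := hy
      simp only [decide_eq_false_iff_not, not_lt]
      have : key y = k := by simpa using hkey
      omega)]
    rw [insertBy_all_before _ _ _ (by
      intro y hy
      simp only [List.mem_flatMap, List.mem_range'_1, List.mem_filter] at hy
      obtain ⟨k, hk, _, hkey⟩ := hy
      have : key y = k := by simpa using hkey
      simp only [decide_eq_true_eq]
      omega)]
    -- RHS: distribute over the appended [x]
    have hlow : (List.range' 0 (c+1)).flatMap (fun k => (ys ++ [x]).filter (fun z => key z == k))
        = (List.range' 0 (c+1)).flatMap (fun k => ys.filter (fun z => key z == k)) ++ [x] := by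
      rw [hr2, List.flatMap_append, List.flatMap_append]
      have hlt : (List.range' 0 c).flatMap (fun k => (ys ++ [x]).filter (fun z => key z == k))
          = (List.range' 0 c).flatMap (fun k => ys.filter (fun z => key z == k)) := by
        apply List.flatMap_congr -- maybe wrong name
        intro k hk
        simp only [List.mem_range'_1] at hk
        rw [List.filter_append]
        have hne : (key x == k) = false := beq_eq_false_iff_ne.2 (by omega)
        simp [List.filter, hne]
      rw [hlt]
      have hcx : (key x == c) = true := by rw [hc]; simp
      have : ([c] : List Nat).flatMap (fun k => (ys ++ [x]).filter (fun z => key z == k))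
          = [c].flatMap (fun k => ys.filter (fun z => key z == k)) ++ [x] := by
        simp [List.filter_append, List.filter, hcx]
      rw [this, List.append_assoc]
    have hhigh : (List.range' (c+1) (m-c)).flatMap (fun k => (ys ++ [x]).filter (fun z => key z == k))
        = (List.range' (c+1) (m-c)).flatMap (fun k => ys.filter (fun z => key z == k)) := by
      apply List.flatMap_congr
      intro k hk
      simp only [List.mem_range'_1] at hk
      rw [List.filter_append]
      have hne : (key x == k) = false := beq_eq_false_iff_ne.2 (by omega)
      simp [List.filter, hne]
    rw [hlow, hhigh]
    simp

-- the bucket-filling fold: length preserved, bucket k collects pages of key k in order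
theorem bucket_foldl_length {α : Type} (l : List (α × Nat)) (bs : List (List α)) :
    (l.foldl (fun bs pk => bs.set pk.2 (bs.getD pk.2 [] ++ [pk.1])) bs).length = bs.length := by
  induction l generalizing bs with
  | nil => rfl
  | cons p t ih => rw [List.foldl_cons, ih]; simp

theorem bucket_foldl_getD {α : Type} (l : List (α × Nat)) (bs : List (List α)) (k : Nat)
    (h : ∀ pk ∈ l, pk.2 < bs.length) :
    (l.foldl (fun bs pk => bs.set pk.2 (bs.getD pk.2 [] ++ [pk.1])) bs).getD k []
      = bs.getD k [] ++ (l.filter (fun pk => pk.2 == k)).map (fun pk => pk.1) := by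
  induction l generalizing bs with
  | nil => simp
  | cons p t ih =>
    simp only [List.foldl_cons]
    rw [ih _ (by
      intro pk hpk
      simpa using h pk (List.mem_cons_of_mem _ hpk))]
    by_cases hk : p.2 = k
    · have hklt : k < bs.length := hk ▸ h p List.mem_cons_self
      have : (bs.set p.2 (bs.getD p.2 [] ++ [p.1])).getD k [] = bs.getD k [] ++ [p.1] := by
        subst hk
        simp [List.getD, hklt]
      rw [this]
      simp [List.filter, hk]
    · have : (bs.set p.2 (bs.getD p.2 [] ++ [p.1])).getD k [] = bs.getD k [] := by
        simp [List.getD, hk]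
      rw [this]
      have hne : (p.2 == k) = false := beq_eq_false_iff_ne.2 hk
      simp [List.filter, hne]

-- A's port computes the stable sort of (page, keyOf page) pairs
theorem fix_manual_eq_sorted (update : List Int) (dict : List (Int × List Int)) :
    fix_manual update dict
      = (PySem.List.sorted (update.map (fun p => (p, keyOf update dict p))) (fun pr => pr.2) false).map
          (fun pr => pr.1) := by
  unfold fix_manual
  have : (fun (acc : List (Int × Nat)) (page : Int) =>
      acc ++ [match dict.lookup page with
        | some pre => (page, (get_relevant_rules pre update).length)
        | none => (page, 0)])
      = fun acc page => acc ++ [(page, keyOf update dict page)] := by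
    funext acc page
    unfold keyOf
    cases dict.lookup page <;> simp [grr_eq_filter]
  simp only
  rw [this, foldl_append_map]
  simp

-- B's keys list is the map of keyOf
theorem keys_eq_map (update : List Int) (dict : List (Int × List Int)) :
    update.foldl (fun ks page =>
      match dict.lookup page with
      | some prereqs => ks ++ [update.countP (fun p => p ∈ prereqs)]
      | none => ks ++ [0]) []
    = update.map (keyOf update dict) := by
  have : (fun (ks : List Nat) (page : Int) =>
      match dict.lookup page with
      | some prereqs => ks ++ [update.countP (fun p => p ∈ prereqs)]
      | none => ks ++ [0])
      = fun ks page => ks ++ [keyOf update dict page] := by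
    funext ks page
    unfold keyOf
    cases dict.lookup page <;> simp [List.countP_eq_length_filter]
  rw [this]
  simpa using foldl_append_map (keyOf update dict) update []

-- the common bucket form
theorem fix_manual_alt_eq_buckets (update : List Int) (dict : List (Int × List Int)) :
    fix_manual_alt update dict
      = (List.range ((update.map (keyOf update dict)).foldl max 0 + 1)).flatMap
          (fun k => update.filter (fun p => keyOf update dict p == k)) := by
  unfold fix_manual_alt
  simp only [keys_eq_map]
  set m := (update.map (keyOf update dict)).foldl max 0 with hm
  have hzip : update.zip (update.map (keyOf update dict))
      = update.map (fun p => (p, keyOf update dict p)) := by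
    have h := List.zip_map' (f := fun p : Int => p) (g := keyOf update dict) (l := update)
    simpa using h
  rw [hzip]
  set pairs := update.map (fun p => (p, keyOf update dict p)) with hpairs
  have hlen : ∀ pk ∈ pairs, pk.2 < (List.replicate (m+1) ([] : List Int)).length := by
    intro pk hpk
    rw [hpairs] at hpk
    simp only [List.mem_map] at hpk
    obtain ⟨p, hp, rfl⟩ := hpk
    simp only [List.length_replicate]
    have := mem_le_foldl_max (update.map (keyOf update dict)) 0 (keyOf update dict p)
      (List.mem_map_of_mem hp)
    omega
  set B := pairs.foldl (fun bs pk => bs.set pk.2 (bs.getD pk.2 [] ++ [pk.1]))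
      (List.replicate (m+1) ([] : List Int)) with hB
  have hBlen : B.length = m + 1 := by
    rw [hB, bucket_foldl_length]; simp
  have hBget : ∀ k, k < m + 1 → B.getD k []
      = update.filter (fun p => keyOf update dict p == k) := by
    intro k hk
    rw [hB, bucket_foldl_getD _ _ _ hlen]
    rw [hpairs, List.filter_map]
    simp [List.getD, hk, Function.comp_def]
  have hBeq : B = (List.range (m+1)).map
      (fun k => update.filter (fun p => keyOf update dict p == k)) := by
    apply List.ext_getElem
    · simp [hBlen]
    · intro k h1 h2
      have hk : k < m + 1 := by simpa [hBlen] using h1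
      have h3 := hBget k hk
      rw [List.getD_eq_getElem?_getD, List.getElem?_eq_getElem h1] at h3
      simp only [Option.getD_some] at h3
      simp [h3]
  rw [hBeq, ← List.flatMap_def]

theorem fix_manual_eq_buckets (update : List Int) (dict : List (Int × List Int)) :
    fix_manual update dict
      = (List.range ((update.map (keyOf update dict)).foldl max 0 + 1)).flatMap
          (fun k => update.filter (fun p => keyOf update dict p == k)) := by
  rw [fix_manual_eq_sorted]
  set m := (update.map (keyOf update dict)).foldl max 0 with hm
  rw [sorted_eq_buckets (fun pr : Int × Nat => pr.2) (update.map (fun p => (p, keyOf update dict p))) m (by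
    intro pr hpr
    simp only [List.mem_map] at hpr
    obtain ⟨p, hp, rfl⟩ := hpr
    exact mem_le_foldl_max _ 0 _ (List.mem_map_of_mem hp))]
  rw [List.map_flatMap]
  congr 1
  funext k
  rw [List.filter_map]
  simp [Function.comp_def]

theorem fix_manual_spec_aux (update : List Int) (dict : List (Int × List Int)) :
    fix_manual update dict = fix_manual_alt update dict := by
  rw [fix_manual_eq_buckets, fix_manual_alt_eq_buckets]

-- ===== VERDICT (by name: the statement is the Claim_ definition above) =====
theorem fix_manual_spec : Claim_equal_fix_manual := by
  intro update dict _
  unfold Spec_fix_manual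
  exact fix_manual_spec_aux update dict
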